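-- pv_equiv track=rewrite | github.com/Yinxiaoli/iros2015_folding | src/folding_control/src/fold.py | parse_waypoints
-- ===== SOURCE A (Python) =====
-- def parse_waypoints(pt_list):
--     """
--     Retrive way point from the list.
--
--     Args:
--         pt_list: Way points list.
--     Return:
--         Parsed way points list for left arm, right arm.
--     """
--     part = []
--     block = []
--     for line in pt_list:
--         if len(line) < 3:
--             block.append(part)
--             part = []
--         else:
--             part.append(line.strip('\r\n'))
--     return block
-- ===== SOURCE B (Python) =====
-- def _first_sep_from(lines, start):
--     """Index >= start of the first separator line (len < 3), or None."""
--     for j in range(start, len(lines)):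
--         if len(lines[j]) < 3:
--             return j
--     return None
--
--
-- def parse_waypoints(pt_list):
--     """
--     Retrive way point from the list.
--
--     Args:
--         pt_list: Way points list.
--     Return:
--         Parsed way points list for left arm, right arm.
--     """
--     blocks = []
--     start = 0
--     while True:
--         j = _first_sep_from(pt_list, start)
--         if j is None:
--             return blocks
--         blocks.append([line.strip('\r\n') for line in pt_list[start:j]])
--         start = j + 1
-- ===== Notes on version B (the rewrite author's own statement) =====
-- stated objective: alternative
-- what changed: B replaces A's single fold with a 'part' accumulator by a repeated split: find the first separator line (len < 3), emit the stripped prefix as a block, and continue on the suffix after it; lines after the last separator are never emitted, as in A.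
import Mathlib
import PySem

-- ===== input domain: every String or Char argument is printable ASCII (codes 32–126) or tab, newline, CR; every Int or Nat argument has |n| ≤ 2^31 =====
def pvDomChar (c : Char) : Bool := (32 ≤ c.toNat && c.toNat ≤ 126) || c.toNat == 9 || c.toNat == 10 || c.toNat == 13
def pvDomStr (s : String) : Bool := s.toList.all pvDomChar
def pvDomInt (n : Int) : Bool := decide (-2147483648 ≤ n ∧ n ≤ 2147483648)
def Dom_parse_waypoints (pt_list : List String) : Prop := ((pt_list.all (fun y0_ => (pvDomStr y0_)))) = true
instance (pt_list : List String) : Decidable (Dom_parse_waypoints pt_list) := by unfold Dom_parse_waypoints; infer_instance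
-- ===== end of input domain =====

-- B replaces A's fold with a 'part' accumulator by a repeated split: find the next
-- separator line (len < 3) from the current start index and emit the stripped slice
-- before it; objective: alternative decomposition, same O(n) cost.

-- ===== PORT A =====
-- for line in pt_list: if len(line) < 3: block.append(part); part = []
--                      else: part.append(line.strip('\r\n'))
-- return block
def parse_waypoints (pt_list : List String) : List (List String) :=
  (pt_list.foldl
    (fun (st : List String × List (List String)) line =>
      if PySem.Str.len line < 3 then ([], st.2 ++ [st.1])
      else (st.1 ++ [PySem.Str.stripChars line "\r\n"], st.2))
    ([], [])).2

-- ===== PORT B =====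
-- helper _first_sep_from: for j in range(start, len(lines)): if len(lines[j]) < 3: return j
-- (index loop as structural recursion on the remaining range)
def firstSepFrom (lines : List String) (j : Nat) : Option Nat :=
  if h : j < lines.length then
    if PySem.Str.len lines[j] < 3 then some j else firstSepFrom lines (j + 1)
  else none
termination_by lines.length - j

-- bound on the returned index (cited by altGo's decreasing_by)
theorem firstSepFrom_bound (lines : List String) (start j : Nat)
    (h : firstSepFrom lines start = some j) : start ≤ j ∧ j < lines.length := by
  fun_induction firstSepFrom lines start with
  | case1 s hlt hsep => simp at h; omega
  | case2 s hlt hsep ih => have := ih h; omega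
  | case3 s hlt => simp at h

-- while True: j = _first_sep_from(pt_list, start); if j is None: return blocks
--             blocks.append([line.strip('\r\n') for line in pt_list[start:j]]); start = j + 1
def altGo (pt_list : List String) (start : Nat) (blocks : List (List String)) : List (List String) :=
  match h : firstSepFrom pt_list start with
  | none => blocks
  | some j =>
    altGo pt_list (j + 1)
      (blocks ++ [((pt_list.drop start).take (j - start)).map (fun line => PySem.Str.stripChars line "\r\n")])
termination_by pt_list.length + 1 - start
decreasing_by
  have := firstSepFrom_bound pt_list start j h
  omega

def parse_waypoints_alt (pt_list : List String) : List (List String) :=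
  altGo pt_list 0 []

-- ===== PRECONDITION & SPEC =====
def Spec_parse_waypoints (pt_list : List String) (out : List (List String)) : Prop := out = parse_waypoints_alt pt_list
instance (pt_list : List String) (out : List (List String)) : Decidable (Spec_parse_waypoints pt_list out) := by unfold Spec_parse_waypoints; infer_instance

-- ===== CLAIM (what is proved, stated in full; the proofs are below) =====
def Claim_equal_parse_waypoints : Prop := ∀ (pt_list : List String), Dom_parse_waypoints pt_list → Spec_parse_waypoints pt_list (parse_waypoints pt_list)

-- ===== LEMMAS AND PROOFS =====

-- the block structure A computes from state `part`, as a plain recursion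
def auxA : List String → List String → List (List String)
  | _, [] => []
  | part, x :: t =>
    if PySem.Str.len x < 3 then part :: auxA [] t
    else auxA (part ++ [PySem.Str.stripChars x "\r\n"]) t

-- index of the first separator of a list (proof-side mirror of firstSepFrom)
def firstSep? : List String → Option Nat
  | [] => none
  | x :: t => if PySem.Str.len x < 3 then some 0 else (firstSep? t).map (· + 1)

theorem foldl_eq_auxA (xs : List String) (part : List String) (block : List (List String)) :
    (xs.foldl
      (fun (st : List String × List (List String)) line =>
        if PySem.Str.len line < 3 then ([], st.2 ++ [st.1])
        else (st.1 ++ [PySem.Str.stripChars line "\r\n"], st.2))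
      (part, block)).2 = block ++ auxA part xs := by
  induction xs generalizing part block with
  | nil => simp [auxA]
  | cons x t ih =>
    simp only [List.foldl_cons, auxA]
    split_ifs with h
    · rw [ih]; simp
    · rw [ih]

theorem auxA_split (xs : List String) (part : List String) :
    auxA part xs =
      match firstSep? xs with
      | none => []
      | some j =>
        (part ++ (xs.take j).map (fun line => PySem.Str.stripChars line "\r\n"))
          :: auxA [] (xs.drop (j + 1)) := by
  induction xs generalizing part with
  | nil => simp [auxA, firstSep?]
  | cons x t ih =>
    simp only [auxA, firstSep?]
    split_ifs with h
    · simp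
    · rw [ih]
      cases hf : firstSep? t with
      | none => simp
      | some j => simp

theorem firstSepFrom_eq (lines : List String) (start : Nat) :
    firstSepFrom lines start = (firstSep? (lines.drop start)).map (· + start) := by
  fun_induction firstSepFrom lines start with
  | case1 s hlt hsep =>
    rw [List.drop_eq_getElem_cons hlt]
    simp only [firstSep?, if_pos hsep]
    simp
  | case2 s hlt hsep ih =>
    rw [List.drop_eq_getElem_cons hlt]
    simp only [firstSep?, if_neg hsep, ih, Option.map_map]
    cases firstSep? (lines.drop (s + 1)) with
    | none => rfl
    | some k => simp; omega
  | case3 s hlt =>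
    rw [List.drop_eq_nil_of_le (by omega)]
    simp [firstSep?]

theorem altGo_eq (pt_list : List String) (start : Nat) (blocks : List (List String)) :
    altGo pt_list start blocks = blocks ++ auxA [] (pt_list.drop start) := by
  fun_induction altGo pt_list start blocks with
  | case1 start blocks h =>
    rw [firstSepFrom_eq] at h
    cases hf : firstSep? (pt_list.drop start) with
    | none => rw [auxA_split, hf]; simp
    | some k => simp [hf] at h
  | case2 start blocks j h ih =>
    rw [firstSepFrom_eq] at h
    cases hf : firstSep? (pt_list.drop start) with
    | none => simp [hf] at h
    | some k =>
      rw [hf] at h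
      simp only [Option.map_some, Option.some.injEq] at h
      subst h
      conv_rhs => rw [auxA_split, hf]
      rw [ih]
      have h1 : k + start - start = k := by omega
      have h2 : List.drop (k + 1) (List.drop start pt_list) = List.drop (k + start + 1) pt_list := by
        rw [List.drop_drop]; congr 1; omega
      simp [h1, h2]

-- ===== VERDICT (by name: the statement is the Claim_ definition above) =====
theorem parse_waypoints_spec : Claim_equal_parse_waypoints := by
  intro pt_list _
  unfold Spec_parse_waypoints parse_waypoints parse_waypoints_alt
  rw [foldl_eq_auxA, altGo_eq]
  simp
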